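-- pv_equiv track=rewrite | github.com/Dicklesworthstone/tsap_mcp_server | src/scripts/check_mcp_completeness.py | req_pattern_matches
-- ===== SOURCE A (Python) =====
-- def req_pattern_matches(required: str, registered: str) -> bool:
--     """Check if a registered resource pattern matches a required pattern.
--
--     Args:
--         required: Required resource pattern
--         registered: Registered resource pattern
--
--     Returns:
--         True if the registered pattern satisfies the required pattern
--     """
--     # Simple exact match
--     if required == registered:
--         return True
--
--     # Handle parameter patterns
--     req_parts = required.split("/")
--     reg_parts = registered.split("/")
--
--     if len(req_parts) != len(reg_parts):
--         return False
--
--     for req_part, reg_part in zip(req_parts, reg_parts):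
--         # Check if parts match or if the required part is a parameter pattern
--         if req_part != reg_part and not (
--             req_part.startswith("{") and req_part.endswith("}")
--         ):
--             return False
--
--     return True
-- ===== SOURCE B (Python) =====
-- def req_pattern_matches(required: str, registered: str) -> bool:
--     """Check if a registered resource pattern matches a required pattern."""
--     def matches(req, reg):
--         if not req or not reg:
--             return not req and not reg
--         head = req[0]
--         ok = head == reg[0] or (head.startswith("{") and head.endswith("}"))
--         return ok and matches(req[1:], reg[1:])
--     return matches(required.split("/"), registered.split("/"))
-- ===== Notes on version B (the rewrite author's own statement) =====
-- stated objective: simpler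
-- what changed: Replaces A's three-stage check (exact-match shortcut, separate length comparison, then a zip loop with a negated guard) by one simultaneous structural recursion over the two segment lists whose base cases subsume both the shortcut and the length check.
import Mathlib
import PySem

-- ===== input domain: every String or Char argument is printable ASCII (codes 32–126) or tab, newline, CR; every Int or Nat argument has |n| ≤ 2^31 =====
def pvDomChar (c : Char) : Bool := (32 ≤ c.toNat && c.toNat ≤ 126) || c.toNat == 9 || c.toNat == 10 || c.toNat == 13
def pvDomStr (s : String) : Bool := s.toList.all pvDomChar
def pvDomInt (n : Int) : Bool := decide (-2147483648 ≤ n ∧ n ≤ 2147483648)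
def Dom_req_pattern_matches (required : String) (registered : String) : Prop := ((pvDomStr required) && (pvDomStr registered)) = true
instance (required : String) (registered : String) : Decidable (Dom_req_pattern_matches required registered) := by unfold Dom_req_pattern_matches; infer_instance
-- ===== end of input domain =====

-- B replaces A's exact-match shortcut + length check + zip loop by one simultaneous
-- structural recursion over the two segment lists (objective: simpler).


-- ===== PORT A =====
-- the for-loop over zip(req_parts, reg_parts) with its early 'return False'
def reqLoopA : List (String × String) → Bool
  | [] => true
  | (req_part, reg_part) :: rest =>
      if req_part != reg_part &&
         !(PySem.Str.startswith req_part "{" && PySem.Str.endswith req_part "}") then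
        false
      else
        reqLoopA rest

def req_pattern_matches (required : String) (registered : String) : Bool :=
  if required == registered then
    true
  else
    let req_parts := (PySem.Str.split? required "/").getD []
    let reg_parts := (PySem.Str.split? registered "/").getD []
    if req_parts.length != reg_parts.length then
      false
    else
      reqLoopA (req_parts.zip reg_parts)

-- ===== PORT B =====
-- the recursive 'matches' helper of Source B
def reqMatchB : List String → List String → Bool
  | [], [] => true
  | [], _ :: _ => false
  | _ :: _, [] => false
  | r :: rs, g :: gs =>
      (r == g || (PySem.Str.startswith r "{" && PySem.Str.endswith r "}")) && reqMatchB rs gs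

def req_pattern_matches_alt (required : String) (registered : String) : Bool :=
  reqMatchB ((PySem.Str.split? required "/").getD []) ((PySem.Str.split? registered "/").getD [])

-- ===== PRECONDITION & SPEC =====
def Spec_req_pattern_matches (required : String) (registered : String) (out : Bool) : Prop := out = req_pattern_matches_alt required registered
instance (required : String) (registered : String) (out : Bool) : Decidable (Spec_req_pattern_matches required registered out) := by unfold Spec_req_pattern_matches; infer_instance

-- ===== CLAIM (what is proved, stated in full; the proofs are below) =====
def Claim_equal_req_pattern_matches : Prop := ∀ (required : String) (registered : String), Dom_req_pattern_matches required registered → Spec_req_pattern_matches required registered (req_pattern_matches required registered)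

-- ===== LEMMAS AND PROOFS =====
theorem reqMatchB_self (xs : List String) : reqMatchB xs xs = true := by
  induction xs with
  | nil => rfl
  | cons x xs ih => simp [reqMatchB, ih]

theorem reqMatchB_len_ne (xs ys : List String) (h : xs.length ≠ ys.length) :
    reqMatchB xs ys = false := by
  induction xs generalizing ys with
  | nil => cases ys with
    | nil => exact absurd rfl h
    | cons y ys => rfl
  | cons x xs ih => cases ys with
    | nil => rfl
    | cons y ys =>
      have : xs.length ≠ ys.length := by simpa using h
      simp [reqMatchB, ih ys this]

theorem reqLoopA_eq_reqMatchB (xs ys : List String) (h : xs.length = ys.length) :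
    reqLoopA (xs.zip ys) = reqMatchB xs ys := by
  induction xs generalizing ys with
  | nil => cases ys with
    | nil => rfl
    | cons y ys => simp at h
  | cons x xs ih => cases ys with
    | nil => simp at h
    | cons y ys =>
      have h' : xs.length = ys.length := by simpa using h
      cases hc : (x == y || (PySem.Str.startswith x "{" && PySem.Str.endswith x "}")) <;>
        simp [reqLoopA, reqMatchB, hc, ih ys h'] <;> rfl

-- ===== VERDICT (by name: the statement is the Claim_ definition above) =====
theorem req_pattern_matches_spec : Claim_equal_req_pattern_matches := by
  intro required registered _
  unfold Spec_req_pattern_matches req_pattern_matches req_pattern_matches_alt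
  by_cases heq : required = registered
  · subst heq
    simp [reqMatchB_self]
  · rw [if_neg (by simpa using heq)]
    by_cases hlen : ((PySem.Str.split? required "/").getD []).length = ((PySem.Str.split? registered "/").getD []).length
    · rw [if_neg (by simpa using hlen)]
      exact reqLoopA_eq_reqMatchB _ _ hlen
    · rw [if_pos (by simpa using hlen)]
      exact (reqMatchB_len_ne _ _ hlen).symm
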